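-- pv_equiv track=rewrite | github.com/Mowglithemaniac/Project0 | Python Examples/A003 transposition.py | organizedkey
-- ===== SOURCE A (Python) =====
-- def organizedkey(modifiedkey):
--     '''
--     Create a
--     '''
--     tmpchar = ''
--     uniqkey = set(modifiedkey)
--     uniqlist = sorted(uniqkey)
--     keyorder = ['']
--     for iteration in range(len(uniqlist)):
--         tmpchar = uniqlist[iteration][0]
--         for letter in range(len(modifiedkey)):
--             if tmpchar == modifiedkey[letter]:
--                  keyorder.append(letter)
--     keyorder.pop(0)
--     return keyorder
-- ===== SOURCE B (Python) =====
-- def organizedkey(modifiedkey):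
--     # One stable sort of the positions by their character; stability keeps
--     # equal characters' positions in increasing order, exactly A's grouping.
--     return sorted(range(len(modifiedkey)), key=lambda letter: modifiedkey[letter])
-- ===== Notes on version B (the rewrite author's own statement) =====
-- stated objective: faster
-- what changed: Replaced the scan of the whole string once per distinct character (building groups char by char) with a single stable sort of the index range keyed by the character at each index.
import Mathlib
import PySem

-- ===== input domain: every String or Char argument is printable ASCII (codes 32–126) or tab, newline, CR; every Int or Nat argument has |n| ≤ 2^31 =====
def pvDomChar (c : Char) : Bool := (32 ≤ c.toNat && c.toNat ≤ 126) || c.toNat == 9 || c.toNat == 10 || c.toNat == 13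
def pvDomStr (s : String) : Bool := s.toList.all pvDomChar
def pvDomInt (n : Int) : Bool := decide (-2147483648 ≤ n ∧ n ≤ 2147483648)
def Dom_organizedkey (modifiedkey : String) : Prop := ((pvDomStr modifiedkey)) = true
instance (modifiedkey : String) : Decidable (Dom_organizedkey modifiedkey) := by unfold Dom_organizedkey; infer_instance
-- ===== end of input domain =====

-- B replaces A's per-distinct-character rescans of the string by ONE stable sort of the
-- index range keyed by the character at each index (asymptotically faster).

-- ===== PORT A =====
-- Python's `keyorder = ['']` sentinel is modelled as `none` in a List (Option Int); appended
-- indices become `some`; after pop(0) only `some`s remain, recovered by reduceOption (exact).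
def organizedkey (modifiedkey : String) : List Int :=
  let chars := modifiedkey.toList
  -- uniqkey = set(modifiedkey); uniqlist = sorted(uniqkey)
  let uniqkey : PySem.Set Char := PySem.Set.ofList chars
  let uniqlist := PySem.List.sorted uniqkey (fun c => c)
  -- for iteration in range(len(uniqlist)): tmpchar = uniqlist[iteration][0]
  --   (indexing [0] of a one-character Python string is the character itself;
  --    both indices are always in range, so the pyGetD defaults are never used)
  let keyorder : List (Option Int) :=
    (PySem.List.pyRange 0 (PySem.List.len uniqlist) 1).foldl
      (fun ko iteration =>
        let tmpchar := PySem.List.pyGetD uniqlist iteration ' '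
        (PySem.List.pyRange 0 (PySem.Str.len modifiedkey) 1).foldl
          (fun ko2 letter =>
            if tmpchar == PySem.List.pyGetD chars letter ' ' then ko2 ++ [some letter] else ko2)
          ko)
      [none]
  -- keyorder.pop(0); return keyorder
  (((PySem.List.pop? keyorder 0).map Prod.snd).getD []).reduceOption

-- ===== PORT B =====
-- return sorted(range(len(modifiedkey)), key=lambda letter: modifiedkey[letter])
-- (the index is always in range, so the pyGetD default ' ' is never used)
def organizedkey_alt (modifiedkey : String) : List Int :=
  let chars := modifiedkey.toList
  PySem.List.sorted (PySem.List.pyRange 0 (PySem.Str.len modifiedkey) 1)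
    (fun letter => PySem.List.pyGetD chars letter ' ')

-- ===== PRECONDITION & SPEC =====
def Spec_organizedkey (modifiedkey : String) (out : List Int) : Prop := out = organizedkey_alt modifiedkey
instance (modifiedkey : String) (out : List Int) : Decidable (Spec_organizedkey modifiedkey out) := by unfold Spec_organizedkey; infer_instance

-- ===== CLAIM (what is proved, stated in full; the proofs are below) =====
def Claim_equal_organizedkey : Prop := ∀ (modifiedkey : String), Dom_organizedkey modifiedkey → Spec_organizedkey modifiedkey (organizedkey modifiedkey)

-- ===== LEMMAS AND PROOFS =====

-- insertBy skips a prefix it does not go before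
lemma insertBy_append_of_forall_not (before : Int → Int → Bool) (x : Int) (as bs : List Int)
    (h : ∀ a ∈ as, before x a = false) :
    PySem.List.insertBy before x (as ++ bs) = as ++ PySem.List.insertBy before x bs := by
  induction as with
  | nil => rfl
  | cons a as ih =>
    simp only [List.cons_append, PySem.List.insertBy]
    rw [h a (by simp)]
    simp only [Bool.false_eq_true, if_false, List.cons.injEq, true_and]
    exact ih (fun a ha => h a (by simp [ha]))

-- insertBy goes before everything it compares below
lemma insertBy_of_forall_before (before : Int → Int → Bool) (x : Int) (ys : List Int)
    (h : ∀ y ∈ ys, before x y = true) :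
    PySem.List.insertBy before x ys = x :: ys := by
  cases ys with
  | nil => rfl
  | cons y ys => simp only [PySem.List.insertBy]; rw [h y (by simp)]; simp

lemma flatMap_congr_mem {α β : Type} (l : List α) (f g : α → List β)
    (h : ∀ c ∈ l, f c = g c) : l.flatMap f = l.flatMap g := by
  induction l with
  | nil => rfl
  | cons c l ih => simp only [List.flatMap_cons, h c (by simp), ih (fun c hc => h c (by simp [hc]))]

-- inserting x into a key-grouped list whose group key is already present: x joins the end of its group
lemma ins_mem (key : Int → Char) (x : Int) (U : List Char) (g : Char → List Int)
    (hU : U.Pairwise (· < ·)) (hg : ∀ c ∈ U, ∀ y ∈ g c, key y = c) (hx : key x ∈ U) :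
    PySem.List.insertBy (fun a b => decide (key a < key b)) x (U.flatMap g)
      = U.flatMap (fun c => g c ++ if c == key x then [x] else []) := by
  induction U with
  | nil => simp at hx
  | cons c U ih =>
    have hc : ∀ c' ∈ U, c < c' := fun c' hc' => (List.pairwise_cons.1 hU).1 c' hc'
    have hU' := (List.pairwise_cons.1 hU).2
    simp only [List.flatMap_cons]
    by_cases hcx : c = key x
    · rw [insertBy_append_of_forall_not _ _ _ _ (by
        intro y hy
        have hk := hg c (by simp) y hy
        simp [hk, hcx])]
      rw [insertBy_of_forall_before _ _ _ (by
        intro y hy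
        obtain ⟨c', hc', hy'⟩ := List.mem_flatMap.1 hy
        have hk := hg c' (by simp [hc']) y hy'
        have hlt := hc c' hc'
        simp only [hk, decide_eq_true_eq]
        rw [← hcx]
        exact hlt)]
      have hcongr : (U.flatMap fun c' => g c' ++ if c' == key x then [x] else []) = U.flatMap g := by
        apply flatMap_congr_mem
        intro c' hc'
        have hne : c' ≠ key x := ne_of_gt (hcx ▸ hc c' hc')
        simp [hne]
      have hcb : (c == key x) = true := by simp [hcx]
      simp only [hcb, if_true, hcongr]
      simp
    · have hx' : key x ∈ U := by
        rcases List.mem_cons.1 hx with h | h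
        · exact absurd h.symm hcx
        · exact h
      have hlt : c < key x := hc _ hx'
      rw [insertBy_append_of_forall_not _ _ _ _ (by
        intro y hy
        have hk := hg c (by simp) y hy
        simp [hk, not_lt_of_gt hlt])]
      rw [ih hU' (fun c' hc' => hg c' (by simp [hc'])) hx']
      have hcb : (c == key x) = false := by simp; exact hcx
      simp only [hcb, Bool.false_eq_true, if_false, List.append_nil]

-- inserting x whose key is new: a fresh singleton group appears where the key sorts
lemma ins_notmem (key : Int → Char) (x : Int) (U : List Char) (g : Char → List Int)
    (hU : U.Pairwise (· < ·)) (hg : ∀ c ∈ U, ∀ y ∈ g c, key y = c) (hx : key x ∉ U) :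
    PySem.List.insertBy (fun a b => decide (key a < key b)) x (U.flatMap g)
      = (PySem.List.insertBy (fun a b => decide (a < b)) (key x) U).flatMap
          (fun c => if c == key x then [x] else g c) := by
  induction U with
  | nil => simp [PySem.List.insertBy]
  | cons c U ih =>
    have hc : ∀ c' ∈ U, c < c' := fun c' hc' => (List.pairwise_cons.1 hU).1 c' hc'
    have hU' := (List.pairwise_cons.1 hU).2
    have hne : key x ≠ c := fun h => hx (by simp [h])
    have hxU : key x ∉ U := fun h => hx (by simp [h])
    by_cases h : key x < c
    · rw [insertBy_of_forall_before _ _ _ (by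
        intro y hy
        obtain ⟨c', hc', hy'⟩ := List.mem_flatMap.1 hy
        have hk := hg c' hc' y hy'
        rcases List.mem_cons.1 hc' with h' | h'
        · simp [hk, h', h]
        · have := hc c' h'
          simp only [hk, decide_eq_true_eq]
          exact lt_trans h this)]
      have hins : PySem.List.insertBy (fun a b : Char => decide (a < b)) (key x) (c :: U)
          = key x :: c :: U := by
        simp [PySem.List.insertBy, h]
      rw [hins]
      have hcongr : ((c :: U).flatMap fun c' => if c' == key x then [x] else g c')
          = (c :: U).flatMap g := by
        apply flatMap_congr_mem
        intro c' hc'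
        have hne' : c' ≠ key x := by
          rcases List.mem_cons.1 hc' with h' | h'
          · subst h'; exact fun hh => hne hh.symm
          · intro hh; subst hh; exact hxU h'
        simp [hne']
      simp only [List.flatMap_cons, beq_self_eq_true, if_true, List.singleton_append, hcongr]
    · have hlt : c < key x := lt_of_le_of_ne (not_lt.1 h) (fun hh => hne hh.symm)
      simp only [List.flatMap_cons]
      rw [insertBy_append_of_forall_not _ _ _ _ (by
        intro y hy
        have hk := hg c (by simp) y hy
        simp [hk, not_lt_of_gt hlt])]
      rw [ih hU' (fun c' hc' => hg c' (by simp [hc'])) hxU]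
      have hcb : (c == key x) = false := by simp; exact fun hh => hne hh.symm
      have hins : PySem.List.insertBy (fun a b : Char => decide (a < b)) (key x) (c :: U)
          = c :: PySem.List.insertBy (fun a b : Char => decide (a < b)) (key x) U := by
        simp [PySem.List.insertBy, h]
      rw [hins]
      simp only [List.flatMap_cons, hcb, Bool.false_eq_true, if_false]

lemma ofList_append_singleton (l : List Char) (k : Char) :
    PySem.Set.ofList (l ++ [k]) = PySem.Set.add (PySem.Set.ofList l) k := by
  rw [PySem.Set.ofList_eq_foldl, PySem.Set.ofList_eq_foldl, List.foldl_append]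
  rfl

-- THE CHARACTERISATION: a stable sort by key is the concatenation, over the sorted
-- distinct keys, of the elements carrying that key in original order.
lemma stable_groups (key : Int → Char) (xs : List Int) :
    PySem.List.sorted xs key
      = (PySem.List.sorted (PySem.Set.ofList (xs.map key)) (fun c => c)).flatMap
          (fun c => xs.filter (fun a => c == key a)) := by
  induction xs using List.reverseRecOn with
  | nil => simp [PySem.List.sorted_eq_foldl_insertBy]
  | append_singleton xs x ih =>
    have hL : PySem.List.sorted (xs ++ [x]) key
        = PySem.List.insertBy (fun a b => decide (key a < key b)) x (PySem.List.sorted xs key) := by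
      rw [PySem.List.sorted_eq_foldl_insertBy, PySem.List.sorted_eq_foldl_insertBy, List.foldl_append]
      rfl
    set S := PySem.Set.ofList (xs.map key) with hS
    set U := PySem.List.sorted S (fun c => c) with hUdef
    have hUpw : U.Pairwise (· < ·) := PySem.List.sorted_ofList_pairwise_lt _
    have hg : ∀ c ∈ U, ∀ y ∈ xs.filter (fun a => c == key a), key y = c := by
      intro c _ y hy
      have := (List.mem_filter.1 hy).2
      exact (beq_iff_eq.1 this).symm
    have hmap : (xs ++ [x]).map key = xs.map key ++ [key x] := by simp
    rw [hL, ih]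
    by_cases hmem : key x ∈ S
    · -- existing key: the distinct-key list is unchanged, x joins its group
      have hadd : PySem.Set.ofList ((xs ++ [x]).map key) = S := by
        rw [hmap, ofList_append_singleton]
        simp only [PySem.Set.add]
        split_ifs with hcon
        · exact hS.symm
        · exact absurd (by simpa using (hS ▸ hmem : key x ∈ PySem.Set.ofList (xs.map key))) hcon
      rw [hadd]
      rw [ins_mem key x U _ hUpw hg (by rw [hUdef, PySem.List.mem_sorted]; exact hmem)]
      apply flatMap_congr_mem
      intro c _
      rw [List.filter_append]
      simp only [List.filter_cons, List.filter_nil]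
    · -- new key: it is inserted into the sorted distinct keys with a singleton group
      have hadd : PySem.Set.ofList ((xs ++ [x]).map key) = S ++ [key x] := by
        rw [hmap, ofList_append_singleton]
        simp only [PySem.Set.add]
        split_ifs with hcon
        · exact absurd (hS ▸ (by simpa using hcon : key x ∈ PySem.Set.ofList (xs.map key))) hmem
        · rw [hS]
      rw [hadd]
      have hsortadd : PySem.List.sorted (S ++ [key x]) (fun c => c)
          = PySem.List.insertBy (fun a b : Char => decide (a < b)) (key x) U := by
        rw [hUdef, PySem.List.sorted_eq_foldl_insertBy, PySem.List.sorted_eq_foldl_insertBy,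
          List.foldl_append]
        rfl
      rw [hsortadd]
      rw [ins_notmem key x U _ hUpw hg (by rw [hUdef, PySem.List.mem_sorted]; exact hmem)]
      apply flatMap_congr_mem
      intro c hcmem
      have hc' : c = key x ∨ c ∈ U :=
        (PySem.List.mem_insertBy (fun a b : Char => decide (a < b)) (key x) c U).1 hcmem
      by_cases hck : c = key x
      · have hcb : (c == key x) = true := by simp [hck]
        have hfil : (xs.filter fun a => c == key a) = [] := by
          rw [List.filter_eq_nil_iff]
          intro a ha hba
          exact hmem (by
            rw [hS, PySem.Set.mem_ofList]
            refine List.mem_map.2 ⟨a, ha, ?_⟩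
            rw [← hck]
            exact (beq_iff_eq.1 hba).symm)
        simp only [List.filter_append, hfil, List.filter_cons, List.filter_nil,
          hcb, if_true, List.nil_append]
      · have hcb : (c == key x) = false := by simp; exact hck
        simp only [List.filter_append, hcb, List.filter_cons, List.filter_nil,
          Bool.false_eq_true, if_false, List.append_nil]

lemma reduceOption_map_some_eq {β : Type} (l : List β) : (l.map some).reduceOption = l := by
  induction l with
  | nil => rfl
  | cons b l ih => simp [List.reduceOption_cons_of_some, ih]

lemma reduceOption_flatMap_map_some {α β : Type} (U : List α) (g : α → List β) :
    (U.flatMap (fun c => (g c).map some)).reduceOption = U.flatMap g := by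
  induction U with
  | nil => rfl
  | cons c U ih =>
    simp only [List.flatMap_cons, List.reduceOption_append, ih, reduceOption_map_some_eq]

-- A's nested loops compute exactly the grouped concatenation
lemma organizedkey_eq_groups (modifiedkey : String) :
    organizedkey modifiedkey
      = (PySem.List.sorted (PySem.Set.ofList modifiedkey.toList) (fun c => c)).flatMap
          (fun c => (PySem.List.pyRange 0 (PySem.Str.len modifiedkey) 1).filter
            (fun letter => c == PySem.List.pyGetD modifiedkey.toList letter ' ')) := by
  unfold organizedkey
  simp only [PySem.List.len_eq]
  rw [PySem.List.foldl_pyRange_zero_pyGetD'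
    (PySem.List.sorted (PySem.Set.ofList modifiedkey.toList) (fun c => c)) ' '
    (fun ko tmpchar => (PySem.List.pyRange 0 (PySem.Str.len modifiedkey) 1).foldl
      (fun ko2 letter => if tmpchar == PySem.List.pyGetD modifiedkey.toList letter ' '
        then ko2 ++ [some letter] else ko2) ko) [none]]
  have h1 : ∀ (tmpchar : Char) (ko : List (Option Int)),
      (PySem.List.pyRange 0 (PySem.Str.len modifiedkey) 1).foldl
        (fun ko2 letter => if tmpchar == PySem.List.pyGetD modifiedkey.toList letter ' '
          then ko2 ++ [some letter] else ko2) ko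
      = ko ++ ((PySem.List.pyRange 0 (PySem.Str.len modifiedkey) 1).filter
          (fun letter => tmpchar == PySem.List.pyGetD modifiedkey.toList letter ' ')).map some := by
    intro tmpchar ko
    exact PySem.List.foldl_append_if _ some _ _
  simp only [h1]
  rw [PySem.List.foldl_append_eq_flatMap]
  rw [List.singleton_append, PySem.List.pop?_zero_cons]
  simp only [Option.map_some, Option.getD_some]
  exact reduceOption_flatMap_map_some _ _

-- ===== VERDICT (by name: the statement is the Claim_ definition above) =====
theorem organizedkey_spec : Claim_equal_organizedkey := by
  intro modifiedkey _
  unfold Spec_organizedkey organizedkey_alt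
  have hmap : (PySem.List.pyRange 0 (PySem.Str.len modifiedkey) 1).map
      (fun letter => PySem.List.pyGetD modifiedkey.toList letter ' ') = modifiedkey.toList := by
    have h : PySem.Str.len modifiedkey = ((modifiedkey.toList).length : Int) := rfl
    rw [h]
    exact PySem.List.map_pyGetD_pyRange_zero' _ _
  rw [organizedkey_eq_groups, stable_groups, hmap]
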